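-- pv_equiv track=rewrite | github.com/COL-IU/ClonalTREE2 | myutils.py | parents_to_children
-- ===== SOURCE A (Python) =====
-- def parents_to_children(parents, num_clones):
--     children = {}
--     for clone in range(0, num_clones):
--         children[clone] = []
--     for clone in range(1, num_clones):
--         if parents[clone] != -1:
--             children[parents[clone]].append(clone)
--     return children
-- ===== SOURCE B (Python) =====
-- def parents_to_children(parents, num_clones):
--     return {p: [c for c in range(1, num_clones) if parents[c] == p]
--             for p in range(num_clones)}
-- ===== Notes on version B (the rewrite author's own statement) =====
-- stated objective: idiomatic
-- what changed: Replaces the two-pass scatter (initialise every key to [], then append each clone to its parent's list) with a single gather dict comprehension that, for each parent key, collects the clones whose parent it is.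
import Mathlib
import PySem

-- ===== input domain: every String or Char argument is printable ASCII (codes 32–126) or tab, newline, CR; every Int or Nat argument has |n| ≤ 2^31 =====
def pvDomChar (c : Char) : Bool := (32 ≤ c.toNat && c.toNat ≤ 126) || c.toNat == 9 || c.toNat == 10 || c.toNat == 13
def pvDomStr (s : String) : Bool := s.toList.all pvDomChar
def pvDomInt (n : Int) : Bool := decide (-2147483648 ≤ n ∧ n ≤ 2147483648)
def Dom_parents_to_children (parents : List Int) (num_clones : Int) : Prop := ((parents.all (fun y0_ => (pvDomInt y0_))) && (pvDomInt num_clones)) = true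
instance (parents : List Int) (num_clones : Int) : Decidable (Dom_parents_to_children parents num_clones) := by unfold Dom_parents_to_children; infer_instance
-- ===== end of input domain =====

-- B replaces A's two-pass scatter (init keys, then append each clone to its parent's list)
-- with a single gather comprehension per parent key; same cost class trade (O(n) -> O(n^2)), chosen for idiomatic clarity.


-- ===== PORT A =====
-- literal port: first loop inserts empty lists for keys 0..num_clones-1; second loop appends
-- each clone to children[parents[clone]].  parents[clone] is ported as pyGetD (IndexError excluded
-- by Pre_) and children[p].append as Dict.modify (KeyError on a missing key excluded by Pre_).
def parents_to_children (parents : List Int) (num_clones : Int) : List (Int × List Int) :=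
  let children : PySem.Dict Int (List Int) :=
    (PySem.List.pyRange 0 num_clones 1).foldl (fun d clone => d.insert clone []) PySem.Dict.empty
  let children :=
    (PySem.List.pyRange 1 num_clones 1).foldl
      (fun d clone =>
        if PySem.List.pyGetD parents clone 0 ≠ -1 then
          d.modify (PySem.List.pyGetD parents clone 0) [] (fun l => l ++ [clone])
        else d)
      children
  children.items

-- ===== PORT B =====
-- literal port of the gather comprehension: {p: [c for c in range(1, n) if parents[c] == p] for p in range(n)}
-- (parents[c] ported as pyGetD; IndexError excluded by Pre_).
def parents_to_children_alt (parents : List Int) (num_clones : Int) : List (Int × List Int) :=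
  (PySem.List.pyRange 0 num_clones 1).map
    (fun p => (p, (PySem.List.pyRange 1 num_clones 1).filter (fun c => PySem.List.pyGetD parents c 0 == p)))

-- ===== PRECONDITION & SPEC =====
-- Pre_ excludes exactly the inputs where Python A raises: IndexError when the parent array is
-- shorter than num_clones (and the second loop actually indexes), and KeyError when some
-- parents[c] is neither -1 nor a key 0..num_clones-1.
def Pre_parents_to_children (parents : List Int) (num_clones : Int) : Prop :=
  (1 < num_clones → num_clones ≤ (parents.length : Int)) ∧
  ∀ c ∈ PySem.List.pyRange 1 num_clones 1,
    PySem.List.pyGetD parents c 0 = -1 ∨ (0 ≤ PySem.List.pyGetD parents c 0 ∧ PySem.List.pyGetD parents c 0 < num_clones)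
instance (parents : List Int) (num_clones : Int) : Decidable (Pre_parents_to_children parents num_clones) := by unfold Pre_parents_to_children; infer_instance
def pvWitness_parents_to_children : List Int × Int := ([-1, 0, 0, 1], 4)

def Spec_parents_to_children (parents : List Int) (num_clones : Int) (out : List (Int × List Int)) : Prop := out = parents_to_children_alt parents num_clones
instance (parents : List Int) (num_clones : Int) (out : List (Int × List Int)) : Decidable (Spec_parents_to_children parents num_clones out) := by unfold Spec_parents_to_children; infer_instance

-- ===== CLAIM (what is proved, stated in full; the proofs are below) =====
def Claim_equal_parents_to_children : Prop := ∀ (parents : List Int) (num_clones : Int), Dom_parents_to_children parents num_clones → Pre_parents_to_children parents num_clones → Spec_parents_to_children parents num_clones (parents_to_children parents num_clones)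

-- ===== LEMMAS AND PROOFS =====

-- The scatter loop's step function.
def pvStep (parents : List Int) (d : PySem.Dict Int (List Int)) (clone : Int) :
    PySem.Dict Int (List Int) :=
  if PySem.List.pyGetD parents clone 0 ≠ -1 then
    d.modify (PySem.List.pyGetD parents clone 0) [] (fun l => l ++ [clone])
  else d

-- The scatter loop never changes the key set when every non-(-1) parent is already a key.
lemma pvKeys_scatter (parents : List Int) (cs : List Int) :
    ∀ d : PySem.Dict Int (List Int),
      (∀ c ∈ cs, PySem.List.pyGetD parents c 0 = -1 ∨ PySem.List.pyGetD parents c 0 ∈ d.keys) →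
      (cs.foldl (pvStep parents) d).keys = d.keys := by
  induction cs with
  | nil => intro d _; rfl
  | cons c cs ih =>
    intro d h
    have hc := h c (List.mem_cons_self ..)
    have hkeys : (pvStep parents d c).keys = d.keys := by
      unfold pvStep
      rcases hc with hc | hc
      · simp [hc]
      · split_ifs with hne
        · rw [PySem.Dict.keys_modify, PySem.Dict.keys_insert_of_contains]
          rw [PySem.Dict.contains_eq_decide_mem_keys]
          simp [hc]
        · rfl
    rw [List.foldl_cons, ih (pvStep parents d c)
        (by intro x hx; rw [hkeys]; exact h x (List.mem_cons_of_mem _ hx)), hkeys]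

-- The scatter loop's value at a key p ≠ -1: old value ++ the clones whose parent is p.
lemma pvGetD_scatter (parents : List Int) (p : Int) (hp : p ≠ -1) (cs : List Int) :
    ∀ d : PySem.Dict Int (List Int),
      (cs.foldl (pvStep parents) d).getD p [] =
        d.getD p [] ++ cs.filter (fun c => PySem.List.pyGetD parents c 0 == p) := by
  induction cs with
  | nil => intro d; simp
  | cons c cs ih =>
    intro d
    rw [List.foldl_cons, ih]
    unfold pvStep
    by_cases hne : PySem.List.pyGetD parents c 0 = -1
    · simp [hne, List.filter_cons]
      omega
    · rw [if_pos hne, PySem.Dict.getD_modify]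
      by_cases hpe : p = PySem.List.pyGetD parents c 0
      · simp [hpe]
      · have hb : (PySem.List.pyGetD parents c 0 == p) = false := by simp; omega
        simp [hpe, hb]

lemma pvInit_items (num_clones : Int) :
    ((PySem.List.pyRange 0 num_clones 1).foldl
        (fun d clone => d.insert clone []) (PySem.Dict.empty : PySem.Dict Int (List Int))).items
      = (PySem.List.pyRange 0 num_clones 1).map (fun p => (p, ([] : List Int))) := by
  rw [PySem.Dict.items_foldl_insert_fresh (PySem.List.pyRange 0 num_clones 1)
    (fun a => a) (fun _ => []) PySem.Dict.empty
    (fun a _ => PySem.Dict.contains_empty a)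
    (by simpa using PySem.List.nodup_pyRange_one 0 num_clones)]
  simp [PySem.Dict.empty]

-- ===== VERDICT (by name: the statement is the Claim_ definition above) =====
theorem parents_to_children_spec : Claim_equal_parents_to_children := by
  intro parents n _ hpre
  unfold Spec_parents_to_children parents_to_children parents_to_children_alt
  dsimp only
  set d0 := (PySem.List.pyRange 0 n 1).foldl
      (fun d clone => d.insert clone []) (PySem.Dict.empty : PySem.Dict Int (List Int)) with hd0
  have hitems0 := pvInit_items n
  rw [← hd0] at hitems0
  have hkeys0 : d0.keys = PySem.List.pyRange 0 n 1 := by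
    unfold PySem.Dict.keys
    rw [hitems0, List.map_map]
    exact List.map_id _
  have hnodup0 : d0.keys.Nodup := by
    rw [hkeys0]; exact PySem.List.nodup_pyRange_one 0 n
  have hgetD0 : ∀ p ∈ PySem.List.pyRange 0 n 1, d0.getD p [] = [] := by
    intro p hp
    exact PySem.Dict.getD_of_mem_items d0
      (by rw [hitems0]; exact List.mem_map_of_mem hp) hnodup0 []
  have hstep : (PySem.List.pyRange 1 n 1).foldl
      (fun d clone =>
        if PySem.List.pyGetD parents clone 0 ≠ -1 then
          d.modify (PySem.List.pyGetD parents clone 0) [] (fun l => l ++ [clone])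
        else d) d0
      = (PySem.List.pyRange 1 n 1).foldl (pvStep parents) d0 := rfl
  rw [hstep]
  set d1 := (PySem.List.pyRange 1 n 1).foldl (pvStep parents) d0 with hd1
  have hparent : ∀ c ∈ PySem.List.pyRange 1 n 1,
      PySem.List.pyGetD parents c 0 = -1 ∨ PySem.List.pyGetD parents c 0 ∈ d0.keys := by
    intro c hc
    rcases hpre.2 c hc with h | h
    · exact Or.inl h
    · exact Or.inr (by rw [hkeys0]; exact (PySem.List.mem_pyRange_one).2 ⟨h.1, h.2⟩)
  have hkeys1 : d1.keys = PySem.List.pyRange 0 n 1 := by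
    rw [hd1, pvKeys_scatter parents _ d0 hparent, hkeys0]
  have hnodup1 : d1.keys.Nodup := by rw [hkeys1]; exact PySem.List.nodup_pyRange_one 0 n
  rw [PySem.Dict.items_eq_map_keys d1 hnodup1 [], hkeys1]
  apply List.map_congr_left
  intro p hp
  have hpmem := (PySem.List.mem_pyRange_one).1 hp
  have hpne : p ≠ -1 := by omega
  rw [hd1, pvGetD_scatter parents p hpne _ d0, hgetD0 p hp]
  simp
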